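-- pv_equiv track=rewrite | github.com/wzygxr/shuati | class147_DynamicProgrammingAndGameTheory/Code01_AppleMinBags.py | min_bags_dp
-- ===== SOURCE A (Python) =====
-- def min_bags_dp(n: int) -> int:
--     """
--     动态规划解法
--
--     解题思路：
--     使用dp[i]表示装i个苹果所需的最少袋子数
--     状态转移方程：dp[i] = min(dp[i-6]+1, dp[i-8]+1)
--
--     时间复杂度：O(n)
--     空间复杂度：O(n)
--
--     优缺点分析：
--     优点：时间复杂度较低，适合中等规模数据
--     缺点：需要额外的O(n)空间
--
--     适用场景：中等规模数据，需要准确结果的场景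
--     """
--     # 异常处理：负数输入无意义
--     if n < 0:
--         return -1
--
--     # 边界条件：0个苹果需要0个袋子
--     if n == 0:
--         return 0
--
--     # 创建dp数组，初始化为无穷大表示初始状态下无法装袋
--     dp = [float('inf')] * (n + 1)
--     dp[0] = 0  # 0个苹果需要0个袋子
--
--     # 动态规划填表，从小到大计算每个苹果数的最少袋子数
--     for i in range(1, n + 1):
--         # 尝试使用6规格的袋子
--         # 如果当前苹果数大于等于6，且使用6规格袋子后剩余苹果可以装袋
--         if i >= 6 and dp[i - 6] != float('inf'):
--             dp[i] = min(dp[i], dp[i - 6] + 1)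
--
--         # 尝试使用8规格的袋子
--         # 如果当前苹果数大于等于8，且使用8规格袋子后剩余苹果可以装袋
--         if i >= 8 and dp[i - 8] != float('inf'):
--             dp[i] = min(dp[i], dp[i - 8] + 1)
--
--     # 如果dp[n]仍为无穷大，说明无法装袋，返回-1；否则返回最少袋子数
--     return dp[n] if dp[n] != float('inf') else -1
-- ===== SOURCE B (Python) =====
-- def min_bags_dp(n: int) -> int:
--     # Closed form: bags of size 6 and 8 can make exactly n iff there is a k
--     # with 6*k <= n <= 8*k and n even; the minimum such k is ceil(n/8).
--     if n < 0 or n % 2: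
--         return -1
--     k = (n + 7) // 8
--     return k if 6 * k <= n else -1
-- ===== Notes on version B (the rewrite author's own statement) =====
-- stated objective: faster
-- what changed: Replaced the O(n) dp-table fill with an O(1) closed form: n is packable iff n is even, nonnegative and 6*ceil(n/8) <= n, in which case the answer is ceil(n/8).
import Mathlib
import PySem

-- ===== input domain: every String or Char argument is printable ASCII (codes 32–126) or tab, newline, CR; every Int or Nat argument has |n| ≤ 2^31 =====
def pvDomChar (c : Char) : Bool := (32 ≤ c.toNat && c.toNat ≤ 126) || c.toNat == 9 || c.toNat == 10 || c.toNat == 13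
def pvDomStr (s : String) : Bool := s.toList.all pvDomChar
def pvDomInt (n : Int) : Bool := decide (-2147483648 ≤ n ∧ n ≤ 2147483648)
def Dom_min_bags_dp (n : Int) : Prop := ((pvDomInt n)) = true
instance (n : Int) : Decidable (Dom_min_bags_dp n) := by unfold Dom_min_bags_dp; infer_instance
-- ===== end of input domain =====

-- B replaces A's O(n) dp-table fill by an O(1) arithmetic closed form; both are total and agree on every int.

-- ===== PORT A =====
-- dp cells are Option Int: `none` plays the role of Python's float('inf') (A only ever
-- compares cells with inf and adds 1 to finite cells, so this encoding is exact).
-- Python's min(x, y) where either side may be inf: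
def pvInfMin : Option Int → Option Int → Option Int
  | none, y => y
  | some a, none => some a
  | some a, some b => some (min a b)

-- one iteration of A's `for i in range(1, n + 1)` body (all indices are in range here)
def pvStep (dp : List (Option Int)) (i : Int) : List (Option Int) :=
  let dp := if 6 ≤ i ∧ PySem.List.pyGetD dp (i - 6) none ≠ none then
      PySem.List.pySetD dp i
        (pvInfMin (PySem.List.pyGetD dp i none) ((PySem.List.pyGetD dp (i - 6) none).map (· + 1)))
    else dp
  if 8 ≤ i ∧ PySem.List.pyGetD dp (i - 8) none ≠ none then
      PySem.List.pySetD dp i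
        (pvInfMin (PySem.List.pyGetD dp i none) ((PySem.List.pyGetD dp (i - 8) none).map (· + 1)))
  else dp

def min_bags_dp (n : Int) : Int :=
  if n < 0 then -1
  else if n = 0 then 0
  else
    let dp : List (Option Int) := List.replicate (n + 1).toNat none
    let dp := PySem.List.pySetD dp 0 (some 0)
    let dp := (PySem.List.pyRange 1 (n + 1) 1).foldl pvStep dp
    match PySem.List.pyGetD dp n none with
    | some v => v
    | none => -1

-- ===== PORT B =====
def min_bags_dp_alt (n : Int) : Int :=
  if n < 0 ∨ PySem.Int.mod n 2 ≠ 0 then -1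
  else
    let k := PySem.Int.floordiv (n + 7) 8
    if 6 * k ≤ n then k else -1

-- ===== PRECONDITION & SPEC =====
def Spec_min_bags_dp (n : Int) (out : Int) : Prop := out = min_bags_dp_alt n
instance (n : Int) (out : Int) : Decidable (Spec_min_bags_dp n out) := by unfold Spec_min_bags_dp; infer_instance

-- ===== CLAIM (what is proved, stated in full; the proofs are below) =====
def Claim_equal_min_bags_dp : Prop := ∀ (n : Int), Dom_min_bags_dp n → Spec_min_bags_dp n (min_bags_dp n)

-- ===== LEMMAS AND PROOFS =====

-- the value dp[j] holds once A's loop has passed index j, as a closed form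
def pvG (j : Nat) : Option Int :=
  if j % 2 = 0 ∧ 6 * ((j + 7) / 8) ≤ j then some (((j + 7) / 8 : Nat) : Int) else none

-- A's dp table after the loop has processed indices 1..m (entries above m still untouched)
def pvTab (N m : Nat) : List (Option Int) :=
  (List.range (N + 1)).map (fun j => if j ≤ m then pvG j else none)

lemma pvTab_length (N m : Nat) : (pvTab N m).length = N + 1 := by simp [pvTab]

lemma pvTab_getElem (N m j : Nat) (hj : j < N + 1) :
    (pvTab N m)[j]'(by simp [pvTab_length, hj]) = if j ≤ m then pvG j else none := by
  simp [pvTab]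

lemma pvTab_read (N m j : Nat) (hj : j ≤ N) :
    PySem.List.pyGetD (pvTab N m) (j : Int) none = if j ≤ m then pvG j else none := by
  rw [PySem.List.pyGetD_natCast, List.getD_eq_getElem _ _ (by simp [pvTab_length]; omega)]
  exact pvTab_getElem N m j (by omega)

lemma pvTab_set_read (N m i j : Nat) (hj : j ≤ N) (v : Option Int) :
    PySem.List.pyGetD ((pvTab N m).set i v) (j : Int) none
      = if i = j then v else if j ≤ m then pvG j else none := by
  rw [PySem.List.pyGetD_natCast, List.getD_eq_getElem _ _ (by simp [pvTab_length]; omega)]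
  rw [List.getElem_set]
  split
  · rfl
  · exact pvTab_getElem N m j (by omega)

lemma pvTab_set_none (N m i : Nat) (hmi : m < i) (hiN : i ≤ N) :
    (pvTab N m).set i none = pvTab N m := by
  apply List.ext_getElem (by simp)
  intro j h1 h2
  rw [List.getElem_set]
  split
  · rw [pvTab_getElem N m j (by simp [pvTab_length] at h2; omega)]
    have : ¬ j ≤ m := by omega
    simp [this]
  · rfl

lemma pvTab_succ (N i : Nat) (h1 : 1 ≤ i) (_hiN : i ≤ N) :
    pvTab N i = (pvTab N (i - 1)).set i (pvG i) := by
  apply List.ext_getElem (by simp [pvTab_length])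
  intro j hj1 hj2
  have hj : j < N + 1 := by simpa [pvTab_length] using hj1
  rw [List.getElem_set, pvTab_getElem N i j hj, pvTab_getElem N (i - 1) j hj]
  by_cases he : i = j
  · subst he; simp
  · have : (j ≤ i) = (j ≤ i - 1) := by apply propext; omega
    simp [he, this]

-- pvG satisfies exactly the recurrence one pass of A's loop body enforces
lemma pvG_rec (i : Nat) (h : 1 ≤ i) :
    pvInfMin (if 6 ≤ i then (pvG (i - 6)).map (· + 1) else none)
             (if 8 ≤ i then (pvG (i - 8)).map (· + 1) else none) = pvG i := by
  rcases lt_or_ge i 14 with hlt | hge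
  · interval_cases i <;> decide
  · have h6 : 6 ≤ i := by omega
    have h8 : 8 ≤ i := by omega
    simp only [if_pos h6, if_pos h8, pvG]
    split_ifs with hc6 hc8 hc8' <;>
      simp only [pvInfMin, Option.map_some, Option.map_none, Option.some.injEq] <;> omega

-- one pass of A's loop body advances the table by one index
lemma pvStep_tab (N i : Nat) (h1 : 1 ≤ i) (hiN : i ≤ N) :
    pvStep (pvTab N (i - 1)) ((i : Nat) : Int) = pvTab N i := by
  have hmi : i - 1 < i := by omega
  have hri : PySem.List.pyGetD (pvTab N (i - 1)) ((i : Nat) : Int) none = none := by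
    rw [pvTab_read N _ i hiN, if_neg (by omega)]
  unfold pvStep
  have step1 : (if 6 ≤ ((i : Nat) : Int) ∧
        PySem.List.pyGetD (pvTab N (i - 1)) (((i : Nat) : Int) - 6) none ≠ none then
      PySem.List.pySetD (pvTab N (i - 1)) ((i : Nat) : Int)
        (pvInfMin (PySem.List.pyGetD (pvTab N (i - 1)) ((i : Nat) : Int) none)
          ((PySem.List.pyGetD (pvTab N (i - 1)) (((i : Nat) : Int) - 6) none).map (· + 1)))
    else pvTab N (i - 1))
      = (pvTab N (i - 1)).set i (if 6 ≤ i then (pvG (i - 6)).map (· + 1) else none) := by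
    by_cases h6 : 6 ≤ i
    · have e6 : ((i : Nat) : Int) - 6 = ((i - 6 : Nat) : Int) := by omega
      have hr6 : PySem.List.pyGetD (pvTab N (i - 1)) (((i : Nat) : Int) - 6) none
          = pvG (i - 6) := by
        rw [e6, pvTab_read N _ _ (by omega), if_pos (by omega)]
      rw [if_pos h6]
      by_cases hg : pvG (i - 6) = none
      · rw [if_neg (by rw [hr6]; simp [hg]), hg]
        simp only [Option.map_none]
        exact (pvTab_set_none N (i - 1) i hmi hiN).symm
      · rw [if_pos (And.intro (by omega) (by rw [hr6]; exact hg)), hri, hr6,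
            PySem.List.pySetD_natCast]
        rfl
    · rw [if_neg (by intro hc; exact h6 (by omega)), if_neg h6]
      exact (pvTab_set_none N (i - 1) i hmi hiN).symm
  rw [step1]
  have hri2 : PySem.List.pyGetD ((pvTab N (i - 1)).set i
        (if 6 ≤ i then (pvG (i - 6)).map (· + 1) else none)) ((i : Nat) : Int) none
      = (if 6 ≤ i then (pvG (i - 6)).map (· + 1) else none) := by
    rw [pvTab_set_read N (i - 1) i i hiN, if_pos rfl]
  by_cases h8 : 8 ≤ i
  · have e8 : ((i : Nat) : Int) - 8 = ((i - 8 : Nat) : Int) := by omega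
    have hr8 : PySem.List.pyGetD ((pvTab N (i - 1)).set i
          (if 6 ≤ i then (pvG (i - 6)).map (· + 1) else none)) (((i : Nat) : Int) - 8) none
        = pvG (i - 8) := by
      rw [e8, pvTab_set_read N (i - 1) i (i - 8) (by omega), if_neg (by omega),
          if_pos (by omega)]
    by_cases hg8 : pvG (i - 8) = none
    · rw [if_neg (by rw [hr8]; simp [hg8])]
      rw [pvTab_succ N i h1 hiN, ← pvG_rec i h1, if_pos h8, hg8]
      simp only [Option.map_none]
      cases hA : (if 6 ≤ i then (pvG (i - 6)).map (· + 1) else none) <;> rfl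
    · rw [if_pos (And.intro (by omega) (by rw [hr8]; exact hg8)), hri2, hr8,
          PySem.List.pySetD_natCast, List.set_set]
      rw [pvTab_succ N i h1 hiN, ← pvG_rec i h1, if_pos h8]
  · rw [if_neg (by intro hc; omega)]
    rw [pvTab_succ N i h1 hiN, ← pvG_rec i h1, if_neg h8]
    cases hA : (if 6 ≤ i then (pvG (i - 6)).map (· + 1) else none) <;> rfl

-- the loop invariant: after folding indices 1..m, A's dp list is exactly pvTab N m
lemma pv_dp_inv (N m : Nat) (hm : m ≤ N) :
    (PySem.List.pyRange 1 ((m : Int) + 1) 1).foldl pvStep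
      (PySem.List.pySetD (List.replicate (N + 1) none) 0 (some 0)) = pvTab N m := by
  induction m with
  | zero =>
    rw [PySem.List.pyRange_one_eq_nil (by norm_num), List.foldl_nil,
        PySem.List.pySetD_of_nonneg]
    · apply List.ext_getElem (by simp [pvTab_length])
      intro j h1 h2
      have hj : j < N + 1 := by simpa using h1
      rw [List.getElem_set, pvTab_getElem N 0 j hj]
      by_cases hj0 : j = 0
      · subst hj0
        norm_num [pvG]
      · simp [show ¬ (j ≤ 0) by omega]; omega
    · norm_num
  | succ m ih =>
    have e1 : ((m + 1 : Nat) : Int) + 1 = ((m : Int) + 1) + 1 := by push_cast; ring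
    rw [e1, PySem.List.pyRange_one_succ_right (by omega), List.foldl_append, List.foldl_cons,
        List.foldl_nil, ih (by omega)]
    have e2 : ((m : Int) + 1) = ((m + 1 : Nat) : Int) := by push_cast; ring
    rw [e2, show m = (m + 1) - 1 from rfl]
    exact pvStep_tab N (m + 1) (by omega) hm

-- reading off pvG n and B's closed form agree
lemma pvB_closed (N : Nat) :
    (match pvG N with | some v => v | none => -1) = min_bags_dp_alt ((N : Nat) : Int) := by
  have hmod : PySem.Int.mod ((N : Nat) : Int) 2 = ((N % 2 : Nat) : Int) := by
    exact_mod_cast PySem.Int.mod_natCast N 2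
  have hdiv : PySem.Int.floordiv (((N : Nat) : Int) + 7) 8 = (((N + 7) / 8 : Nat) : Int) := by
    have : ((N : Nat) : Int) + 7 = ((N + 7 : Nat) : Int) := by push_cast; ring
    rw [this]; exact_mod_cast PySem.Int.floordiv_natCast (N + 7) 8
  unfold min_bags_dp_alt pvG
  rw [hmod, hdiv]
  split_ifs with hg hb hb' <;> simp_all <;> omega

-- ===== VERDICT (by name: the statement is the Claim_ definition above) =====
theorem min_bags_dp_spec : Claim_equal_min_bags_dp := by
  intro n _
  unfold Spec_min_bags_dp
  rcases lt_trichotomy n 0 with hn | hn | hn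
  · rw [min_bags_dp, if_pos hn, min_bags_dp_alt, if_pos (Or.inl hn)]
  · subst hn; decide
  · obtain ⟨N, rfl⟩ : ∃ N : Nat, n = ((N : Nat) : Int) := ⟨n.toNat, by omega⟩
    have hN : 1 ≤ N := by exact_mod_cast hn
    rw [min_bags_dp, if_neg (by omega), if_neg (by omega)]
    have e1 : (((N : Nat) : Int) + 1).toNat = N + 1 := by omega
    rw [e1]
    show (match PySem.List.pyGetD
        ((PySem.List.pyRange 1 (((N : Nat) : Int) + 1) 1).foldl pvStep
          (PySem.List.pySetD (List.replicate (N + 1) none) 0 (some 0))) ((N : Nat) : Int) none with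
      | some v => v | none => -1) = min_bags_dp_alt ((N : Nat) : Int)
    rw [pv_dp_inv N N (le_refl N), pvTab_read N N N (le_refl N), if_pos (le_refl N)]
    exact pvB_closed N
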